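-- pv_equiv track=rewrite | github.com/hyowonsong/Algorithm1 | 프로그래머스/1/140108. 문자열 나누기/문자열 나누기.py | solution
-- ===== SOURCE A (Python) =====
-- def solution(s):
--     answer = 0
--
--     # 문자열이 비어 있지 않을 동안 반복
--     while s:
--         # 현재 문자열의 첫 번째 글자를 기준으로 설정
--         x = s[0]
--
--         # 기준 글자 x의 개수, 기준 글자가 아닌 글자의 개수를 저장
--         count_x = 0
--         count_not_x = 0
--
--         # 문자열의 각 글자를 순회
--         for i in range(len(s)):
--             # 현재 글자가 기준 글자와 같다면
--             if s[i] == x: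
--                 count_x += 1
--             # 현재 글자가 기준 글자와 다르다면
--             else:
--                 count_not_x += 1
--
--             # 기준 글자와 기준이 아닌 글자의 개수가 같아지면
--             if count_x == count_not_x:
--                 # 분리된 문자열 개수를 증가
--                 answer += 1
--                 # 현재까지 읽은 문자열을 제거하고 남은 문자열로 갱신
--                 s = s[i+1:]
--                 # 현재 반복 종료 후 남은 문자열 처리
--                 break
--
--         # for문이 끝날 때까지 두 개수가 같지 않은 경우
--         else:
--             # 남은 문자열을 하나의 부분 문자열로 간주
--             answer += 1
--             # 더 이상 처리할 문자열이 없으므로 작업 종료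
--             break
--
--     return answer
-- ===== SOURCE B (Python) =====
-- def solution(s):
--     answer = 0
--     x = ''
--     same = 0
--     diff = 0
--     for c in s:
--         if same == diff:
--             answer += 1
--             x = c
--             same, diff = 1, 0
--         elif c == x:
--             same += 1
--         else:
--             diff += 1
--     return answer
-- ===== Notes on version B (the rewrite author's own statement) =====
-- stated objective: faster
-- what changed: Replaced the O(n^2) restart-and-slice outer while loop with a single linear pass keeping running same/diff counts that reset (and count a new segment) whenever the counts equalize; no string slicing.
import Mathlib
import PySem

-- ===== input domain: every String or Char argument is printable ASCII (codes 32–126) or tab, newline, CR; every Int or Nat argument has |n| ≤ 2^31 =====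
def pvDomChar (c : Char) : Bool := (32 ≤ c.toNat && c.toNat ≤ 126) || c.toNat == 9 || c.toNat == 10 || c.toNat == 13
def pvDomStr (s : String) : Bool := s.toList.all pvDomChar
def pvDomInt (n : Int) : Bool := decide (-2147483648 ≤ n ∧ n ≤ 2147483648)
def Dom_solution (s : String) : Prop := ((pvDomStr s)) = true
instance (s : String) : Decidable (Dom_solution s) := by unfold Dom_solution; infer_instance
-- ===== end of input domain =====

-- B replaces A's restart-and-slice outer loop by one linear pass with running counts (faster).

-- ===== PORT A =====
-- inner for loop of A: walk the remaining characters updating count_x / count_not_x;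
-- when they equalize return the remaining suffix (= s[i+1:]); none = the for-else branch.
def solInner (x : Char) (cx cn : Int) : List Char → Option (List Char)
  | [] => none
  | c :: rest =>
      let cx' := if c = x then cx + 1 else cx
      let cn' := if c = x then cn else cn + 1
      if cx' = cn' then some rest else solInner x cx' cn' rest

-- innerA consumes at least one character, so the suffix it returns is strictly shorter
theorem solInner_length (x : Char) : ∀ (l : List Char) (cx cn : Int) (r : List Char),
    solInner x cx cn l = some r → r.length < l.length := by
  intro l
  induction l with
  | nil => intro cx cn r h; simp [solInner] at h
  | cons c rest ih =>
      intro cx cn r h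
      by_cases hc : c = x <;> simp only [solInner, hc, if_pos, if_neg, not_false_iff] at h <;>
        [skip; skip] <;> split at h <;>
        first
          | (cases h; simp)
          | exact Nat.lt_trans (ih _ _ _ h) (by simp)

-- outer while loop of A
def solOuter : List Char → Int → Int
  | [], answer => answer
  | c :: rest, answer =>
      match h : solInner c 0 0 (c :: rest) with
      | some r => solOuter r (answer + 1)
      | none => answer + 1
termination_by l => l.length
decreasing_by exact solInner_length _ _ _ _ _ h

def solution (s : String) : Int := solOuter s.toList 0

-- ===== PORT B =====
-- single pass; the initial marker char is never compared (first step has same = diff),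
-- so Python's x = '' is rendered by an arbitrary character.
def solScan : List Char → Int → Char → Int → Int → Int
  | [], answer, _, _, _ => answer
  | c :: rest, answer, x, same, diff =>
      if same = diff then solScan rest (answer + 1) c 1 0
      else if c = x then solScan rest answer x (same + 1) diff
      else solScan rest answer x same (diff + 1)

def solution_alt (s : String) : Int := solScan s.toList 0 'a' 0 0

-- ===== PRECONDITION & SPEC =====
def Spec_solution (s : String) (out : Int) : Prop := out = solution_alt s
instance (s : String) (out : Int) : Decidable (Spec_solution s out) := by unfold Spec_solution; infer_instance

-- ===== CLAIM (what is proved, stated in full; the proofs are below) =====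
def Claim_equal_solution : Prop := ∀ (s : String), Dom_solution s → Spec_solution s (solution s)

-- ===== LEMMAS AND PROOFS =====

-- in a balanced state (same = diff) the scan's behaviour does not depend on x or the common count
theorem solScan_balanced (l : List Char) (ans : Int) (x x' : Char) (e e' : Int) :
    solScan l ans x e e = solScan l ans x' e' e' := by
  cases l with
  | nil => simp [solScan]
  | cons c rest => simp [solScan]

-- the scan in an unbalanced state tracks A's inner loop exactly
theorem solScan_inner (x : Char) : ∀ (l : List Char) (cx cn ans : Int), cx ≠ cn →
    solScan l ans x cx cn =
      match solInner x cx cn l with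
      | none => ans
      | some r => solScan r ans x 0 0 := by
  intro l
  induction l with
  | nil => intro cx cn ans h; simp [solScan, solInner]
  | cons c rest ih =>
      intro cx cn ans h
      by_cases hc : c = x
      · by_cases heq : cx + 1 = cn
        · simp [solScan, solInner, h, hc, heq, solScan_balanced rest ans x x cn 0]
        · have := ih (cx + 1) cn ans heq
          simp [solScan, solInner, h, hc, heq, this]
      · by_cases heq : cx = cn + 1
        · simp [solScan, solInner, hc, heq, solScan_balanced rest ans x x (cn + 1) 0]
        · have := ih cx (cn + 1) ans heq
          simp [solScan, solInner, h, hc, heq, this]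

-- main invariant: from a balanced start the scan computes A's outer loop
theorem solOuter_eq_scan : ∀ (l : List Char) (ans : Int),
    solOuter l ans = solScan l ans 'a' 0 0 := by
  intro l ans
  fun_induction solOuter l ans with
  | case1 answer => simp [solScan]
  | case2 c rest answer r hr ih =>
      have hb : solScan (c :: rest) answer 'a' 0 0 = solScan rest (answer + 1) c 1 0 := by
        simp [solScan]
      have hstep : solInner c 1 0 rest = some r := by
        have : solInner c 0 0 (c :: rest) = solInner c 1 0 rest := by simp [solInner]
        rw [← this]; exact hr
      rw [hb, solScan_inner c rest 1 0 (answer + 1) (by decide), hstep, ih,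
        solScan_balanced r (answer + 1) 'a' c 0 0]
  | case3 c rest answer hr =>
      have hb : solScan (c :: rest) answer 'a' 0 0 = solScan rest (answer + 1) c 1 0 := by
        simp [solScan]
      have hstep : solInner c 1 0 rest = none := by
        have : solInner c 0 0 (c :: rest) = solInner c 1 0 rest := by simp [solInner]
        rw [← this]; exact hr
      rw [hb, solScan_inner c rest 1 0 (answer + 1) (by decide), hstep]

-- ===== VERDICT (by name: the statement is the Claim_ definition above) =====
theorem solution_spec : Claim_equal_solution := by
  intro s _
  unfold Spec_solution solution solution_alt
  exact solOuter_eq_scan s.toList 0
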